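-- pv_equiv track=rewrite | github.com/Sknow1112/PMB | pmbl.py | calculate_similarity_score
-- ===== SOURCE A (Python) =====
-- def calculate_similarity_score(text1, text2):
--     words1 = text1.lower().split()
--     words2 = text2.lower().split()
--
--     score = 0
--     for i in range(len(words1) - 1):
--         if words1[i] in words2 and words1[i + 1] in words2:
--             score += 1
--
--     return score
-- ===== SOURCE B (Python) =====
-- def calculate_similarity_score(text1, text2):
--     vocab = set(text2.lower().split())
--     total = 0
--     run = 0
--     for w in text1.lower().split():
--         if w in vocab:
--             run += 1
--         else:
--             if run > 1:
--                 total += run - 1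
--             run = 0
--     if run > 1:
--         total += run - 1
--     return total
-- ===== Notes on version B (the rewrite author's own statement) =====
-- stated objective: alternative
-- what changed: B counts by maximal runs: it scans the first text's words once keeping the length of the current run of words present in a set of the second text's words, and on each run end adds (run length - 1), instead of A's per-index test of both neighbours with a linear list membership per word.
import Mathlib
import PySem

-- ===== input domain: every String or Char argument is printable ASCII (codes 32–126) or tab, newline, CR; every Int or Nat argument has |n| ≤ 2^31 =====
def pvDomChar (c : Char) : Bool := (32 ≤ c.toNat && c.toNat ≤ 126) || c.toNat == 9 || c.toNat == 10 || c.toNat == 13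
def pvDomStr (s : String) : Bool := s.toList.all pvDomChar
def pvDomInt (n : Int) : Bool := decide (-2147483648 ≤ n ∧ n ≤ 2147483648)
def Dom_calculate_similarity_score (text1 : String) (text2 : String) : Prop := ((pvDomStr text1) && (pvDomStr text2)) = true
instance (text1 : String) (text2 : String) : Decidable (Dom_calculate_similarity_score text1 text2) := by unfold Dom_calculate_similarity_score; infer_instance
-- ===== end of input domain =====

-- B counts by maximal runs: a single scan keeps the length of the current run of words present
-- in a set of the second text's words and adds (run length - 1) at each run end, instead of
-- A's per-index test of both neighbours with a linear list membership per word.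

-- ===== PORT A =====
def calculate_similarity_score (text1 : String) (text2 : String) : Int :=
  let words1 := PySem.Str.split₀ (PySem.Str.lower text1)
  let words2 := PySem.Str.split₀ (PySem.Str.lower text2)
  (PySem.List.pyRange 0 ((words1.length : Int) - 1) 1).foldl
    (fun score i =>
      if PySem.List.pyGetD words1 i "" ∈ words2 ∧ PySem.List.pyGetD words1 (i + 1) "" ∈ words2
      then score + 1 else score) 0

-- ===== PORT B =====
def calculate_similarity_score_alt (text1 : String) (text2 : String) : Int :=
  let vocab : PySem.Set String := PySem.Set.ofList (PySem.Str.split₀ (PySem.Str.lower text2))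
  let st := (PySem.Str.split₀ (PySem.Str.lower text1)).foldl
      (fun st w => if vocab.contains w then (st.1, st.2 + 1)
                   else (if st.2 > 1 then st.1 + st.2 - 1 else st.1, (0:Int)))
      ((0:Int), (0:Int))
  if st.2 > 1 then st.1 + st.2 - 1 else st.1

-- ===== PRECONDITION & SPEC =====
def Spec_calculate_similarity_score (text1 : String) (text2 : String) (out : Int) : Prop := out = calculate_similarity_score_alt text1 text2
instance (text1 : String) (text2 : String) (out : Int) : Decidable (Spec_calculate_similarity_score text1 text2 out) := by unfold Spec_calculate_similarity_score; infer_instance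

-- ===== CLAIM =====
def Claim_equal_calculate_similarity_score : Prop := ∀ (text1 : String) (text2 : String), Dom_calculate_similarity_score text1 text2 → Spec_calculate_similarity_score text1 text2 (calculate_similarity_score text1 text2)

-- ===== LEMMAS AND PROOFS =====

-- counting adjacent positions by index equals counting over the list zipped with its tail
lemma pair_count {α : Type} (f : α → α → Bool) (d : α) :
    ∀ l : List α,
    (List.range (l.length - 1)).countP (fun k => f (l.getD k d) (l.getD (k+1) d))
    = (l.zip l.tail).countP (fun q => f q.1 q.2) := by
  intro l
  induction l with
  | nil => simp
  | cons x xs ih =>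
    cases xs with
    | nil => simp
    | cons y t =>
      simp only [List.length_cons, Nat.add_sub_cancel, List.range_succ_eq_map,
        List.countP_cons, List.countP_map, Function.comp_def, List.zip_cons_cons,
        List.tail_cons, List.getD_cons_succ, List.getD_cons_zero] at *
      omega

-- B's run-accumulating fold, flushed at the end, counts the adjacent pairs of p-words;
-- the last summand is the boundary pair between a pending run and the head of bs.
lemma run_count {α : Type} (p : α → Bool) :
    ∀ (bs : List α) (t r : Int), 0 ≤ r →
    (let q := bs.foldl (fun st w => if p w then (st.1, st.2 + 1)
        else (if st.2 > 1 then st.1 + st.2 - 1 else st.1, (0:Int))) (t, r)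
     if q.2 > 1 then q.1 + q.2 - 1 else q.1)
    = t + (if r > 1 then r - 1 else 0)
      + (((bs.zip bs.tail).countP (fun q => p q.1 && p q.2) : Nat) : Int)
      + (match bs with | [] => (0:Int) | x :: _ => if 0 < r ∧ p x = true then 1 else 0) := by
  intro bs
  induction bs with
  | nil =>
    intro t r hr
    simp only [List.foldl_nil, List.zip_nil_left, List.countP_nil]
    split_ifs <;> omega
  | cons x xs ih =>
    intro t r hr
    by_cases hp : p x = true
    · have h := ih t (r + 1) (by omega)
      simp only [List.foldl_cons, hp, if_true] at h ⊢
      rw [h]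
      cases xs with
      | nil => simp; split_ifs <;> omega
      | cons y ys =>
        simp only [List.zip_cons_cons, List.tail_cons, List.countP_cons, hp]
        by_cases hpy : p y = true <;> simp [hpy] <;> split_ifs <;> omega
    · have h := ih (if r > 1 then t + r - 1 else t) 0 (by omega)
      simp only [List.foldl_cons, hp, if_false, Bool.false_eq_true] at h ⊢
      rw [h]
      cases xs with
      | nil => simp; split_ifs <;> omega
      | cons y ys =>
        simp only [List.zip_cons_cons, List.tail_cons, List.countP_cons, hp]
        simp
        split_ifs <;> omega

-- ===== VERDICT =====
theorem calculate_similarity_score_spec : Claim_equal_calculate_similarity_score := by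
  intro text1 text2 _
  unfold Spec_calculate_similarity_score
  unfold calculate_similarity_score calculate_similarity_score_alt
  dsimp only
  set l := PySem.Str.split₀ (PySem.Str.lower text1) with hl
  set ws := PySem.Str.split₀ (PySem.Str.lower text2) with hws
  rw [PySem.List.foldl_ite_add_one, PySem.List.pyRange_one]
  have htn : (((l.length : Int) - 1) - 0).toNat = l.length - 1 := by omega
  rw [htn]
  have hL : ((fun x : Int => decide (PySem.List.pyGetD l x "" ∈ ws ∧ PySem.List.pyGetD l (x + 1) "" ∈ ws)) ∘ fun k : Nat => (0 : Int) + ↑k)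
      = (fun k : Nat => (fun a b : String => decide (a ∈ ws) && decide (b ∈ ws)) (l.getD k "") (l.getD (k+1) "")) := by
    funext k
    have h2 : ((k : Int)) + 1 = ((k + 1 : Nat) : Int) := by push_cast; ring
    simp only [Function.comp_def, zero_add, h2, PySem.List.pyGetD_natCast]
    simp
  rw [List.countP_map, hL]
  have key := pair_count (fun a b : String => decide (a ∈ ws) && decide (b ∈ ws)) "" l
  beta_reduce at key
  rw [key]
  have hrun := run_count (fun w => (PySem.Set.ofList ws).contains w) l 0 0 (by omega)
  simp only [] at hrun
  rw [hrun]
  have hpred : (fun q : String × String => (PySem.Set.ofList ws).contains q.1 && (PySem.Set.ofList ws).contains q.2)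
      = (fun q : String × String => decide (q.1 ∈ ws) && decide (q.2 ∈ ws)) := by
    funext q; simp
  rw [hpred]
  cases l with
  | nil => simp
  | cons x xs => simp
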